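-- pv_equiv track=rewrite | github.com/jubin75/KVI | experiments/exp01_main_qa/code/metrics.py | parse_fever_label
-- ===== SOURCE A (Python) =====
-- from typing import Any, Dict, Iterable, Optional, Tuple
--
-- _FEVER_LABEL_SCAN_ORDER = ("NOT ENOUGH INFO", "REFUTES", "SUPPORTS")
--
-- def parse_fever_label(pred: str) -> Optional[str]:
--     """
--     Heuristic: first occurrence of a standard label in model output (case-insensitive).
--     Use when gold is SUPPORTS / REFUTES / NOT ENOUGH INFO.
--     """
--     if not str(pred or "").strip():
--         return None
--     u = pred.upper()
--     best_pos: Optional[int] = None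
--     best_lab: Optional[str] = None
--     for lab in _FEVER_LABEL_SCAN_ORDER:
--         p = u.find(lab)
--         if p < 0:
--             continue
--         if best_pos is None or p < best_pos:
--             best_pos = p
--             best_lab = lab
--     return best_lab
-- ===== SOURCE B (Python) =====
-- _FEVER_LABELS = ("NOT ENOUGH INFO", "REFUTES", "SUPPORTS")
--
-- def parse_fever_label(pred):
--     if not str(pred or "").strip():
--         return None
--     u = pred.upper()
--     for i in range(len(u)):
--         for lab in _FEVER_LABELS:
--             if u.startswith(lab, i):
--                 return lab
--     return None
-- ===== Notes on version B (the rewrite author's own statement) =====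
-- stated objective: alternative
-- what changed: B does one left-to-right positional scan over the string, returning at the first position where any label starts (leftmost match), instead of A's three separate full .find passes with min-position bookkeeping; equivalent because no two labels can start at the same position.
import Mathlib
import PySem

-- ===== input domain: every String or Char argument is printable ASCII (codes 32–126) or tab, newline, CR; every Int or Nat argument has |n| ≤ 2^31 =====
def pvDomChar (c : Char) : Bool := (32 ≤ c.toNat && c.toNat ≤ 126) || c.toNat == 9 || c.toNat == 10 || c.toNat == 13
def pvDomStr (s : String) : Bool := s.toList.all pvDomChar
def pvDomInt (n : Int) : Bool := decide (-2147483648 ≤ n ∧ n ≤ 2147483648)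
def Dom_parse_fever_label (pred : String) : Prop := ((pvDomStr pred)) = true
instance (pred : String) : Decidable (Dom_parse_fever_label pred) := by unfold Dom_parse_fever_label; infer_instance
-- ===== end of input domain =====

-- B replaces A's three full .find passes + min-position bookkeeping by a single left-to-right
-- positional scan returning at the first position where any label starts (objective: alternative).


-- ===== PORT A =====
-- _FEVER_LABEL_SCAN_ORDER = ("NOT ENOUGH INFO", "REFUTES", "SUPPORTS")
def pvScanOrder : List String := ["NOT ENOUGH INFO", "REFUTES", "SUPPORTS"]

def parse_fever_label (pred : String) : Option String :=
  -- 'not str(pred or "").strip()': for a str argument, 'pred or ""' is pred unless pred is empty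
  if PySem.Str.strip (if pred = "" then "" else pred) = "" then none
  else
    let u := PySem.Str.upper pred
    (pvScanOrder.foldl
      (fun (st : Option Int × Option String) lab =>
        let p := PySem.Str.find u lab
        if p < 0 then st
        else
          match st.1 with
          | none => (some p, some lab)
          | some bp => if p < bp then (some p, some lab) else st)
      (none, none)).2

-- ===== PORT B =====
-- inner 'for lab in _FEVER_LABELS: if u.startswith(lab, i): return lab' at one position,
-- outer 'for i in range(len(u))' as recursion over the successive suffixes of u
def pvScanB : List Char → Option String
  | [] => none
  | c :: rest =>
    if "NOT ENOUGH INFO".toList.isPrefixOf (c :: rest) then some "NOT ENOUGH INFO"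
    else if "REFUTES".toList.isPrefixOf (c :: rest) then some "REFUTES"
    else if "SUPPORTS".toList.isPrefixOf (c :: rest) then some "SUPPORTS"
    else pvScanB rest

def parse_fever_label_alt (pred : String) : Option String :=
  if PySem.Str.strip (if pred = "" then "" else pred) = "" then none
  else pvScanB (PySem.Str.upper pred).toList

-- ===== PRECONDITION & SPEC =====
def Spec_parse_fever_label (pred : String) (out : Option String) : Prop := out = parse_fever_label_alt pred
instance (pred : String) (out : Option String) : Decidable (Spec_parse_fever_label pred out) := by unfold Spec_parse_fever_label; infer_instance

-- ===== CLAIM (what is proved, stated in full; the proofs are below) =====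
def Claim_equal_parse_fever_label : Prop := ∀ (pred : String), Dom_parse_fever_label pred → Spec_parse_fever_label pred (parse_fever_label pred)

-- ===== LEMMAS AND PROOFS =====

-- find on a cons, derived from the PySem first-occurrence spec lemmas
theorem pv_find_cons (c : Char) (cs sub : List Char) :
    PySem.Chars.find (c :: cs) sub =
      if sub <+: (c :: cs) then 0
      else if PySem.Chars.find cs sub = -1 then -1 else PySem.Chars.find cs sub + 1 := by
  by_cases hp : sub <+: (c :: cs)
  · simp only [hp, if_true]
    have h0 : 0 ≤ PySem.Chars.find (c :: cs) sub :=
      (PySem.Chars.find_nonneg_iff _ _).mpr hp.isInfix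
    obtain ⟨_, hmin⟩ := PySem.Chars.find_spec h0
    by_contra hne
    have hpos : 0 < (PySem.Chars.find (c :: cs) sub).toNat := by omega
    exact hmin 0 hpos (by simpa using hp)
  · simp only [hp, if_false]
    by_cases h2 : PySem.Chars.find cs sub = -1
    · simp only [h2, if_true]
      have hni : ¬ sub <:+: cs := (PySem.Chars.find_eq_neg_one_iff _ _).mp h2
      refine (PySem.Chars.find_eq_neg_one_iff _ _).mpr ?_
      rw [List.infix_cons_iff]
      rintro (h | h)
      · exact hp h
      · exact hni h
    · simp only [h2, if_false]
      have hg0 : 0 ≤ PySem.Chars.find cs sub := by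
        have := PySem.Chars.neg_one_le_find cs sub; omega
      obtain ⟨hpre, hmin⟩ := PySem.Chars.find_spec hg0
      have hinf : sub <:+: (c :: cs) := by
        rw [List.infix_cons_iff]
        exact Or.inr (hpre.isInfix.trans (List.drop_suffix _ _).isInfix)
      have h0 : 0 ≤ PySem.Chars.find (c :: cs) sub :=
        (PySem.Chars.find_nonneg_iff _ _).mpr hinf
      obtain ⟨hpre', hmin'⟩ := PySem.Chars.find_spec h0
      set F := PySem.Chars.find (c :: cs) sub with hF
      set p := PySem.Chars.find cs sub with hpdef
      have hFne : F.toNat ≠ 0 := by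
        intro h
        rw [h] at hpre'
        exact hp (by simpa using hpre')
      obtain ⟨k, hk⟩ : ∃ k, F.toNat = k + 1 := ⟨F.toNat - 1, by omega⟩
      rw [hk, List.drop_succ_cons] at hpre'
      have hk1 : p.toNat ≤ k := by
        by_contra h
        exact hmin k (by omega) hpre'
      have hk2 : F.toNat ≤ p.toNat + 1 := by
        by_contra h
        exact hmin' (p.toNat + 1) (by omega) (by rw [List.drop_succ_cons]; exact hpre)
      omega

-- the value A's fold computes, as a function of the three find results
def pvSel (f1 f2 f3 : Int) : Option String :=
  if 0 ≤ f1 ∧ (f2 < 0 ∨ f1 ≤ f2) ∧ (f3 < 0 ∨ f1 ≤ f3) then some "NOT ENOUGH INFO"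
  else if 0 ≤ f2 ∧ (f3 < 0 ∨ f2 ≤ f3) then some "REFUTES"
  else if 0 ≤ f3 then some "SUPPORTS"
  else none

-- B's leftmost positional scan picks the label whose find position is minimal
theorem pv_scan_eq_sel (u : List Char) :
    pvScanB u = pvSel (PySem.Chars.find u "NOT ENOUGH INFO".toList)
                      (PySem.Chars.find u "REFUTES".toList)
                      (PySem.Chars.find u "SUPPORTS".toList) := by
  induction u with
  | nil =>
    have h : ∀ sub : List Char, sub ≠ [] → PySem.Chars.find [] sub = -1 := fun sub hs =>
      (PySem.Chars.find_eq_neg_one_iff _ _).mpr (by simp [List.infix_nil, hs])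
    rw [h _ (by decide), h _ (by decide), h _ (by decide)]
    decide
  | cons c cs ih =>
    rw [pv_find_cons, pv_find_cons, pv_find_cons]
    have e1 := PySem.Chars.neg_one_le_find cs "NOT ENOUGH INFO".toList
    have e2 := PySem.Chars.neg_one_le_find cs "REFUTES".toList
    have e3 := PySem.Chars.neg_one_le_find cs "SUPPORTS".toList
    by_cases h1 : "NOT ENOUGH INFO".toList <+: (c :: cs)
    · rw [pvScanB, if_pos ((List.isPrefixOf_iff_prefix).mpr h1)]
      simp only [h1, if_true]
      unfold pvSel
      split_ifs <;> first | rfl | omega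
    · by_cases h2 : "REFUTES".toList <+: (c :: cs)
      · rw [pvScanB, if_neg (by rw [List.isPrefixOf_iff_prefix]; exact h1),
            if_pos ((List.isPrefixOf_iff_prefix).mpr h2)]
        simp only [h1, h2, if_true, if_false]
        unfold pvSel
        split_ifs <;> first | rfl | omega
      · by_cases h3 : "SUPPORTS".toList <+: (c :: cs)
        · rw [pvScanB, if_neg (by rw [List.isPrefixOf_iff_prefix]; exact h1),
              if_neg (by rw [List.isPrefixOf_iff_prefix]; exact h2),
              if_pos ((List.isPrefixOf_iff_prefix).mpr h3)]
          simp only [h1, h2, h3, if_true, if_false]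
          unfold pvSel
          split_ifs <;> first | rfl | omega
        · rw [pvScanB, if_neg (by rw [List.isPrefixOf_iff_prefix]; exact h1),
              if_neg (by rw [List.isPrefixOf_iff_prefix]; exact h2),
              if_neg (by rw [List.isPrefixOf_iff_prefix]; exact h3)]
          rw [ih]
          simp only [h1, h2, h3, if_false]
          unfold pvSel
          split_ifs <;> first | rfl | omega

-- A's fold over the three labels equals pvSel of the three find results
theorem pv_fold_eq_sel (u : String)
    (e1 : -1 ≤ PySem.Str.find u "NOT ENOUGH INFO")
    (e2 : -1 ≤ PySem.Str.find u "REFUTES")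
    (e3 : -1 ≤ PySem.Str.find u "SUPPORTS") :
    (pvScanOrder.foldl
      (fun (st : Option Int × Option String) lab =>
        let p := PySem.Str.find u lab
        if p < 0 then st
        else
          match st.1 with
          | none => (some p, some lab)
          | some bp => if p < bp then (some p, some lab) else st)
      (none, none)).2
    = pvSel (PySem.Str.find u "NOT ENOUGH INFO") (PySem.Str.find u "REFUTES")
            (PySem.Str.find u "SUPPORTS") := by
  simp only [pvScanOrder, List.foldl]
  unfold pvSel
  split_ifs <;> first | rfl | (exfalso; omega) | (dsimp only; split_ifs <;> first | rfl | (exfalso; omega) | (dsimp only; split_ifs <;> first | rfl | (exfalso; omega)))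

-- ===== VERDICT (by name: the statement is the Claim_ definition above) =====
theorem parse_fever_label_spec : Claim_equal_parse_fever_label := by
  intro pred _
  unfold Spec_parse_fever_label parse_fever_label parse_fever_label_alt
  by_cases hg : PySem.Str.strip (if pred = "" then "" else pred) = ""
  · simp only [hg, if_true]
  · simp only [hg, if_false]
    rw [pv_fold_eq_sel _ (by simpa using PySem.Chars.neg_one_le_find _ _)
          (by simpa using PySem.Chars.neg_one_le_find _ _)
          (by simpa using PySem.Chars.neg_one_le_find _ _),
        pv_scan_eq_sel]
    simp
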